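-- pv_equiv track=rewrite | github.com/Xu-Wentao/dotfile | .config/teleai-super-agent/skills/diagram-drawing/scripts/process_code.py | _auto_close_angle_brackets
-- ===== SOURCE A (Python) =====
-- def _auto_close_angle_brackets(text):
--     """Auto-close unclosed angle brackets (< without matching >)."""
--     text = str(text) if text is not None else ''
--     length = len(text)
--     if not length:
--         return text
--
--     out = []
--     i = 0
--
--     while i < length:
--         lt = text.find('<', i)
--         if lt == -1:
--             out.append(text[i:])
--             break
--
--         out.append(text[i:lt])
--
--         j = lt + 1
--         found_gt = -1
--         found_next_lt = -1
--         while j < length: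
--             ch = text[j]
--             if ch == '>':
--                 found_gt = j
--                 break
--             if ch == '<':
--                 found_next_lt = j
--                 break
--             j += 1
--
--         if found_gt != -1 and (found_next_lt == -1 or found_gt < found_next_lt):
--             out.append(text[lt:found_gt + 1])
--             i = found_gt + 1
--             continue
--
--         if found_next_lt == -1:
--             segment = text[lt:]
--             out.append(segment if segment.endswith('>') else segment + '>')
--             break
--         else:
--             segment = text[lt:found_next_lt]
--             out.append(segment if segment.endswith('>') else segment + '>')
--             i = found_next_lt
--
--     return ''.join(out)
-- ===== SOURCE B (Python) =====
-- def _auto_close_angle_brackets(text):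
--     """Auto-close unclosed angle brackets: one pass with a single open flag."""
--     text = str(text) if text is not None else ''
--     if not text:
--         return text
--     out = []
--     opened = False
--     for ch in text:
--         if ch == '<':
--             if opened:
--                 out.append('>')
--             out.append('<')
--             opened = True
--         elif ch == '>':
--             out.append('>')
--             opened = False
--         else:
--             out.append(ch)
--     if opened:
--         out.append('>')
--     return ''.join(out)
-- ===== Notes on version B (the rewrite author's own statement) =====
-- stated objective: simpler
-- what changed: Replaced A's find('<')-plus-lookahead segment machinery (outer while with index jumps, inner scan for the next '>' or '<', slicing and endswith checks) by a single character-by-character pass maintaining one boolean open flag.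
import Mathlib
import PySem

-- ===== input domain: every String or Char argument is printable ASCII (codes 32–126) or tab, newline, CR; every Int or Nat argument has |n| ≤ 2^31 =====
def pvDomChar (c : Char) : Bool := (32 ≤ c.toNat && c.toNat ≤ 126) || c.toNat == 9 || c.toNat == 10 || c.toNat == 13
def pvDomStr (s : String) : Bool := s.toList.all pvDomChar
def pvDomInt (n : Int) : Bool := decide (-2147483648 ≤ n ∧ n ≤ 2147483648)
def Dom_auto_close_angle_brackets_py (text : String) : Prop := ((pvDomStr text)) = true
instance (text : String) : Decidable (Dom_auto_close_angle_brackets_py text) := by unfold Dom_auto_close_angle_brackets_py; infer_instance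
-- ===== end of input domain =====

-- B replaces A's find('<')+lookahead-segment structure by a single character pass
-- with one boolean "open" flag (objective: simpler). In Lean, `text` is already a
-- String, so Python's `str(text) if text is not None else ''` is the identity.

-- ===== PORT A =====
-- A's outer while loop: the state `i` is represented by the remaining suffix
-- `rest = text[i:]` (a List Char). `text.find('<', i)` is the split of `rest`
-- at the first '<' (takeWhile/dropWhile); the inner `j` scan is the split of the
-- part after '<' at the first '>' or '<'. Branches are kept in A's order,
-- including A's segment.endswith('>') checks, verbatim.
def pvLoopA : List Char → List Char
  | rest =>
    let pre := rest.takeWhile (· ≠ '<')              -- text[i:lt]  (or text[i:] if lt == -1)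
    match h1 : rest.dropWhile (· ≠ '<') with
    | [] => pre                                      -- lt == -1: append text[i:], break
    | _ :: after =>                                  -- head is '<' (position lt)
      let mid := after.takeWhile (fun c => c ≠ '>' ∧ c ≠ '<')
      match h2 : after.dropWhile (fun c => c ≠ '>' ∧ c ≠ '<') with
      | [] =>                                        -- found_gt == -1 and found_next_lt == -1
        let seg := '<' :: mid                        -- segment = text[lt:]
        pre ++ (if seg.getLast? = some '>' then seg else seg ++ ['>'])
      | c :: t =>
        if c = '>' then                              -- found_gt first: text[lt:found_gt+1], i = found_gt+1
          pre ++ ('<' :: mid ++ ['>']) ++ pvLoopA t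
        else                                         -- found_next_lt first
          let seg := '<' :: mid                      -- segment = text[lt:found_next_lt]
          pre ++ (if seg.getLast? = some '>' then seg else seg ++ ['>']) ++ pvLoopA (c :: t)
  termination_by rest => rest.length
  decreasing_by
  all_goals {
    show _ < rest.length
    have hr : (rest.dropWhile (fun x => decide (x ≠ '<'))).length ≤ rest.length :=
      List.length_dropWhile_le _ _
    have ha : (after.dropWhile (fun c => decide (c ≠ '>' ∧ c ≠ '<'))).length ≤ after.length :=
      List.length_dropWhile_le _ _
    rw [h1] at hr; rw [h2] at ha; simp at hr ha; simp; omega }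

def auto_close_angle_brackets_py (text : String) : String :=
  if text.toList.length = 0 then text               -- `if not length: return text`
  else String.ofList (pvLoopA text.toList)              -- ''.join(out)

-- ===== PORT B =====
-- Source B's single pass: one boolean `opened` flag, emitting characters as it goes;
-- a trailing '>' is appended when the flag is still set at the end.
def pvLoopB : List Char → Bool → List Char
  | [], opened => if opened then ['>'] else []
  | ch :: t, opened =>
    if ch = '<' then
      (if opened then ['>', '<'] else ['<']) ++ pvLoopB t true
    else if ch = '>' then
      '>' :: pvLoopB t false
    else
      ch :: pvLoopB t opened

def auto_close_angle_brackets_py_alt (text : String) : String :=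
  if text.toList.length = 0 then text               -- `if not text: return text`
  else String.ofList (pvLoopB text.toList false)        -- ''.join(out)

-- ===== PRECONDITION & SPEC =====
def Spec_auto_close_angle_brackets_py (text : String) (out : String) : Prop := out = auto_close_angle_brackets_py_alt text
instance (text : String) (out : String) : Decidable (Spec_auto_close_angle_brackets_py text out) := by unfold Spec_auto_close_angle_brackets_py; infer_instance

-- ===== CLAIM (what is proved, stated in full; the proofs are below) =====
def Claim_equal_auto_close_angle_brackets_py : Prop := ∀ (text : String), Dom_auto_close_angle_brackets_py text → Spec_auto_close_angle_brackets_py text (auto_close_angle_brackets_py text)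

-- ===== LEMMAS AND PROOFS =====

-- B's pass over a chunk with no '<' and the flag down just copies the chunk.
lemma pvLoopB_no_lt (pre : List Char) (h : ∀ c ∈ pre, c ≠ '<') (t : List Char) :
    pvLoopB (pre ++ t) false = pre ++ pvLoopB t false := by
  induction pre with
  | nil => rfl
  | cons c cs ih =>
    have hc : c ≠ '<' := h c (by simp)
    by_cases hgt : c = '>' <;>
      simp [pvLoopB, hc, hgt, ih (fun x hx => h x (by simp [hx]))]

-- B's pass over a chunk with no '<' and no '>' with the flag up copies the chunk
-- and keeps the flag up.
lemma pvLoopB_mid (mid : List Char) (h : ∀ c ∈ mid, c ≠ '>' ∧ c ≠ '<') (t : List Char) :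
    pvLoopB (mid ++ t) true = mid ++ pvLoopB t true := by
  induction mid with
  | nil => rfl
  | cons c cs ih =>
    have hc := h c (by simp)
    simp [pvLoopB, hc.1, hc.2, ih (fun x hx => h x (by simp [hx]))]

-- A's `segment.endswith('>')` test is always false: segment = '<' :: mid where
-- mid contains no '>'.
lemma pvSeg_getLast (mid : List Char) (h : ∀ c ∈ mid, c ≠ '>') :
    ('<' :: mid).getLast? ≠ some '>' := by
  cases mid with
  | nil => simp
  | cons c cs =>
    rw [List.getLast?_cons_cons]
    intro hcontra
    exact h _ (List.mem_of_getLast? hcontra) rfl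

-- Main invariant: A's outer loop on a suffix equals B's pass started with the
-- flag down; induction on a length bound covers both of A's recursive calls.
lemma pvLoopA_eq_loopB_bounded :
    ∀ n (rest : List Char), rest.length ≤ n → pvLoopA rest = pvLoopB rest false := by
  intro n
  induction n with
  | zero =>
    intro rest h
    have : rest = [] := List.eq_nil_of_length_eq_zero (Nat.le_zero.mp h)
    subst this
    rw [pvLoopA]
    rfl
  | succ n ih =>
    intro rest hn
    have hsplit : rest.takeWhile (· ≠ '<') ++ rest.dropWhile (· ≠ '<') = rest :=
      List.takeWhile_append_dropWhile
    have hpre : ∀ c ∈ rest.takeWhile (· ≠ '<'), c ≠ '<' := by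
      intro c hc
      simpa using List.mem_takeWhile_imp hc
    rw [pvLoopA]
    split
    next h1 =>
      -- lt == -1: A copies the tail; B's flag never rises
      have hre : rest.takeWhile (· ≠ '<') = rest := by
        conv_rhs => rw [← hsplit, h1]
        rw [List.append_nil]
      have h0 := pvLoopB_no_lt _ hpre []
      rw [List.append_nil, hre] at h0
      rw [hre, h0]
      simp [pvLoopB]
    next hd after h1 =>
      have hhd : hd = '<' := by
        have h3 := List.head_dropWhile_not (p := fun x => decide (x ≠ '<')) (l := rest)
          (by rw [h1]; simp)
        simp only [h1, List.head_cons] at h3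
        simpa using h3
      subst hhd
      have hmidsplit : after.takeWhile (fun c => c ≠ '>' ∧ c ≠ '<') ++
          after.dropWhile (fun c => c ≠ '>' ∧ c ≠ '<') = after :=
        List.takeWhile_append_dropWhile
      have hmid : ∀ c ∈ after.takeWhile (fun c => c ≠ '>' ∧ c ≠ '<'), c ≠ '>' ∧ c ≠ '<' := by
        intro c hc
        have := List.mem_takeWhile_imp hc
        simpa using this
      have hrest : rest = rest.takeWhile (· ≠ '<') ++ '<' :: after := by
        conv_lhs => rw [← hsplit, h1]
      have hlenA : after.length < rest.length := by
        conv_rhs => rw [hrest]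
        simp
        omega
      -- B's pass over rest: the '<'-free prefix with the flag down, then '<' raises the flag
      have hB : pvLoopB rest false =
          rest.takeWhile (· ≠ '<') ++ '<' :: pvLoopB after true := by
        conv_lhs => rw [hrest]
        rw [pvLoopB_no_lt _ hpre]
        simp [pvLoopB]
      split
      next h2 =>
        -- A: no '>' and no further '<' — segment + ['>'] and stop; B: flag still up at the end
        have hafter : after.takeWhile (fun c => c ≠ '>' ∧ c ≠ '<') = after := by
          conv_rhs => rw [← hmidsplit, h2]
          rw [List.append_nil]
        have hmb := pvLoopB_mid _ hmid []
        rw [List.append_nil, hafter] at hmb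
        have hng := pvSeg_getLast _ (fun c hc => (hmid c hc).1)
        simp only [ne_eq, Bool.decide_and, decide_not] at hng
        rw [hB, hmb]
        simp [hng, pvLoopB]
        intro x hx
        exact hmid x (by rw [hafter]; exact hx)
      next c t h2 =>
        have hafter2 : after = after.takeWhile (fun c => c ≠ '>' ∧ c ≠ '<') ++ c :: t := by
          conv_lhs => rw [← hmidsplit, h2]
        have hc : ¬ (c ≠ '>' ∧ c ≠ '<') := by
          have h3 := List.head_dropWhile_not (p := fun c => decide (c ≠ '>' ∧ c ≠ '<'))
            (l := after) (by rw [h2]; simp)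
          simp only [h2, List.head_cons] at h3
          simpa using h3
        have hlenT : t.length < after.length := by
          conv_rhs => rw [hafter2]
          simp
          omega
        have hBafter : pvLoopB after true =
            after.takeWhile (fun c => c ≠ '>' ∧ c ≠ '<') ++ pvLoopB (c :: t) true := by
          conv_lhs => rw [hafter2]
          exact pvLoopB_mid _ hmid _
        by_cases hgt : c = '>'
        · -- A: found '>' first — emit through it, continue after it
          subst hgt
          rw [if_pos rfl, hB, hBafter]
          have hIH : pvLoopA t = pvLoopB t false := ih t (by omega)
          simp [pvLoopB, hIH]
        · -- A: found another '<' first — force-close and continue at it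
          have hlt : c = '<' := by
            by_contra hne
            exact hc ⟨hgt, hne⟩
          have hng := pvSeg_getLast _ (fun x hx => (hmid x hx).1)
          simp only [ne_eq, Bool.decide_and, decide_not] at hng
          have hIH : pvLoopA (c :: t) = pvLoopB (c :: t) false := by
            apply ih
            simp
            omega
          rw [if_neg hgt, hB, hBafter, hIH]
          subst hlt
          simp [hng, pvLoopB]

lemma pvLoopA_eq_loopB (rest : List Char) : pvLoopA rest = pvLoopB rest false :=
  pvLoopA_eq_loopB_bounded rest.length rest le_rfl

-- ===== VERDICT (by name: the statement is the Claim_ definition above) =====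
theorem auto_close_angle_brackets_py_spec : Claim_equal_auto_close_angle_brackets_py := by
  intro text _
  unfold Spec_auto_close_angle_brackets_py auto_close_angle_brackets_py auto_close_angle_brackets_py_alt
  by_cases h : text.toList.length = 0
  · simp [h]
  · simp [pvLoopA_eq_loopB]
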